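-- pv_equiv track=rewrite | github.com/behenate/ASD | Sekcja_1_Kolokwium_1/Zadania_Bit_Algo/Bit_Algo_2/zad3.py | find_recur_in_heap
-- ===== SOURCE A (Python) =====
-- def find_recur_in_heap(heap, value, index, k, found):
--     l_child = 2 * index + 1
--     r_child = l_child + 1
--     c = 0
--     if heap[index] <= value and found < k:
--         c += 1
--         if l_child < len(heap):
--             c += find_recur_in_heap(heap, value, l_child, k, found + c)
--         if r_child < len(heap):
--             c += find_recur_in_heap(heap, value, r_child, k, found + c)
--     return c
-- ===== SOURCE B (Python) =====
-- def find_recur_in_heap(heap, value, index, k, found):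
--     # Uncapped DFS count of the <=value-connected subtree, then arithmetic cap.
--     n = len(heap)
--     if heap[index] > value:
--         return 0
--     total = 0
--     stack = [index]
--     while stack:
--         i = stack.pop()
--         total += 1
--         for ch in (2 * i + 1, 2 * i + 2):
--             if ch < n and heap[ch] <= value:
--                 stack.append(ch)
--     return max(0, min(k - found, total))
-- ===== Notes on version B (the rewrite author's own statement) =====
-- stated objective: alternative
-- what changed: Replaces the k-capped recursive pre-order traversal (which threads the found counter through the recursion) by an iterative explicit-stack DFS that counts the whole <=value-connected subtree without a cap, then applies the cap arithmetically as max(0, min(k-found, total)).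
-- outside the precondition, e.g. on find_recur_in_heap([1, 2], 5, -1, 1, 0): A returns 1, B does not finish within the time limit; on find_recur_in_heap([1, 2], 5, 2, 1, 0): A raises IndexError, B raises IndexError
import Mathlib
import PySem

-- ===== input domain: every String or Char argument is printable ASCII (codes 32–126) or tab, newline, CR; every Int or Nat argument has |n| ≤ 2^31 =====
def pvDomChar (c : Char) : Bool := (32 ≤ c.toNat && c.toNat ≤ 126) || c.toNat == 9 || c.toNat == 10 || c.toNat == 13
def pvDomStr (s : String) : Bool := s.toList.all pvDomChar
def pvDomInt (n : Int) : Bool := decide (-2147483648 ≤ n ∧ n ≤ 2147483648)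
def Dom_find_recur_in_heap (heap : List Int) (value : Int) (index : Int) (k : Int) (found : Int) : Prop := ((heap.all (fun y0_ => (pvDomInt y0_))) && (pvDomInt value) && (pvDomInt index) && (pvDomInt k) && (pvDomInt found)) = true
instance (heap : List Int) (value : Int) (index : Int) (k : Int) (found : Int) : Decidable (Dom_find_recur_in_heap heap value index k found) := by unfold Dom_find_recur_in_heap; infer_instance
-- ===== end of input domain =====

-- B replaces A's k-capped recursive pre-order count by an uncapped explicit-stack DFS count
-- followed by an arithmetic cap max(0, min(k-found, total)); objective: alternative (same task, different algorithm).

-- ===== PORT A =====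
-- heap[index]: pyGetD with dummy default 0 — Pre_ restricts to 0 ≤ index < len(heap), where
-- Python's heap[index] succeeds; fuel makes the (Python-divergent outside Pre_) recursion total,
-- heap.length + 1 exceeds the recursion depth on every input Pre_ admits.
def findRecA (heap : List Int) (value : Int) (k : Int) : Nat → Int → Int → Int
  | 0, _, _ => 0
  | fuel + 1, index, found =>
    let l_child := 2 * index + 1
    let r_child := l_child + 1
    let c : Int := 0
    if PySem.List.pyGetD heap index 0 ≤ value ∧ found < k then
      let c := c + 1
      let c := if l_child < (heap.length : Int) then c + findRecA heap value k fuel l_child (found + c) else c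
      let c := if r_child < (heap.length : Int) then c + findRecA heap value k fuel r_child (found + c) else c
      c
    else c

def find_recur_in_heap (heap : List Int) (value : Int) (index : Int) (k : Int) (found : Int) : Int :=
  findRecA heap value k (heap.length + 1) index found

-- ===== PORT B =====
-- B's while loop over the explicit stack (list head = top of stack; Python appends
-- l_child then r_child, so r_child ends on top). Fuel 2^len(heap) bounds the number of pops
-- on every input Pre_ admits (each pop handles a distinct tree position).
def loopB (heap : List Int) (value : Int) : Nat → List Int → Int → Int
  | 0, _, total => total
  | _ + 1, [], total => total
  | fuel + 1, i :: stack, total =>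
    let total := total + 1
    let stack := if 2 * i + 1 < (heap.length : Int) ∧ PySem.List.pyGetD heap (2 * i + 1) 0 ≤ value then (2 * i + 1) :: stack else stack
    let stack := if 2 * i + 2 < (heap.length : Int) ∧ PySem.List.pyGetD heap (2 * i + 2) 0 ≤ value then (2 * i + 2) :: stack else stack
    loopB heap value fuel stack total

def find_recur_in_heap_alt (heap : List Int) (value : Int) (index : Int) (k : Int) (found : Int) : Int :=
  if value < PySem.List.pyGetD heap index 0 then 0
  else
    let total := loopB heap value (2 ^ heap.length) [index] 0
    max 0 (min (k - found) total)

-- ===== PRECONDITION & SPEC =====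
-- Pre_ excludes out-of-range indices, where A raises IndexError, and negative indices, where
-- Python's negative-index wraparound makes A revisit the same node forever (A returns an
-- accidental k-capped value or hits RecursionError; B's loop does not terminate there).
def Pre_find_recur_in_heap (heap : List Int) (value : Int) (index : Int) (k : Int) (found : Int) : Prop :=
  0 ≤ index ∧ index < (heap.length : Int)
instance (heap : List Int) (value : Int) (index : Int) (k : Int) (found : Int) : Decidable (Pre_find_recur_in_heap heap value index k found) := by unfold Pre_find_recur_in_heap; infer_instance
def pvWitness_find_recur_in_heap : List Int × Int × Int × Int × Int := ([3, 1, 4, 1, 5], 3, 0, 2, 0)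

def Spec_find_recur_in_heap (heap : List Int) (value : Int) (index : Int) (k : Int) (found : Int) (out : Int) : Prop := out = find_recur_in_heap_alt heap value index k found
instance (heap : List Int) (value : Int) (index : Int) (k : Int) (found : Int) (out : Int) : Decidable (Spec_find_recur_in_heap heap value index k found out) := by unfold Spec_find_recur_in_heap; infer_instance

-- ===== CLAIM (what is proved, stated in full; the proofs are below) =====
def Claim_equal_find_recur_in_heap : Prop := ∀ (heap : List Int) (value : Int) (index : Int) (k : Int) (found : Int), Dom_find_recur_in_heap heap value index k found → Pre_find_recur_in_heap heap value index k found → Spec_find_recur_in_heap heap value index k found (find_recur_in_heap heap value index k found)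

-- ===== LEMMAS AND PROOFS =====

-- Mathematical description of both programs: size of the ≤value-connected subtree rooted at i.
def sizeS (heap : List Int) (value : Int) (i : Nat) : Nat :=
  if _h : i < heap.length then
    if heap.getD i 0 ≤ value then
      1 + (if 2 * i + 1 < heap.length then sizeS heap value (2 * i + 1) else 0)
        + (if 2 * i + 2 < heap.length then sizeS heap value (2 * i + 2) else 0)
    else 0
  else 0
termination_by heap.length - i
decreasing_by all_goals omega

lemma sizeS_pos (heap : List Int) (value : Int) (i : Nat)
    (hi : i < heap.length) (hv : heap.getD i 0 ≤ value) : 1 ≤ sizeS heap value i := by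
  rw [sizeS, dif_pos hi, if_pos hv]; omega

lemma sizeS_eq_zero_of_gt (heap : List Int) (value : Int) (i : Nat)
    (h : ¬ heap.getD i 0 ≤ value) : sizeS heap value i = 0 := by
  rw [sizeS]; split_ifs <;> simp_all

lemma sizeS_le_aux (heap : List Int) (value : Int) :
    ∀ (m i : Nat), heap.length - i ≤ m → sizeS heap value i ≤ 2 ^ (heap.length - i) - 1 := by
  intro m
  induction m with
  | zero =>
    intro i hm
    rw [sizeS]
    split_ifs <;> omega
  | succ m ih =>
    intro i hm
    rw [sizeS]
    split_ifs with h1 h2 h3 h4 h4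
    · -- both children
      have hl := ih (2 * i + 1) (by omega)
      have hr := ih (2 * i + 2) (by omega)
      have p1 : 2 ^ (heap.length - (2 * i + 1)) ≤ 2 ^ (heap.length - i - 1) :=
        Nat.pow_le_pow_right (by norm_num) (by omega)
      have p2 : 2 ^ (heap.length - (2 * i + 2)) ≤ 2 ^ (heap.length - i - 1) :=
        Nat.pow_le_pow_right (by norm_num) (by omega)
      have p3 : 2 ^ (heap.length - i) = 2 ^ (heap.length - i - 1) * 2 := by
        rw [← pow_succ]; congr 1; omega
      have p4 : 1 ≤ 2 ^ (heap.length - i - 1) := Nat.one_le_two_pow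
      omega
    all_goals
      first
      | (have hl := ih (2 * i + 1) (by omega)
         have p1 : 2 ^ (heap.length - (2 * i + 1)) ≤ 2 ^ (heap.length - i - 1) :=
           Nat.pow_le_pow_right (by norm_num) (by omega)
         have p3 : 2 ^ (heap.length - i) = 2 ^ (heap.length - i - 1) * 2 := by
           rw [← pow_succ]; congr 1; omega
         have p4 : 1 ≤ 2 ^ (heap.length - i - 1) := Nat.one_le_two_pow
         omega)
      | (have p4 : 1 ≤ 2 ^ (heap.length - i) := Nat.one_le_two_pow
         omega)

lemma sizeS_le (heap : List Int) (value : Int) (i : Nat) :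
    sizeS heap value i ≤ 2 ^ (heap.length - i) - 1 :=
  sizeS_le_aux heap value (heap.length - i) i le_rfl

lemma findRecA_eq (heap : List Int) (value k : Int) (fuel : Nat) :
    ∀ (i : Nat) (f : Int), i < heap.length → heap.length - i ≤ fuel →
      findRecA heap value k fuel (i : Int) f
        = max 0 (min (k - f) ((sizeS heap value i : Int))) := by
  induction fuel with
  | zero => intro i f hi hm; omega
  | succ fuel ih =>
    intro i f hi hm
    rw [findRecA, sizeS]
    simp only [PySem.List.pyGetD_natCast, dif_pos hi]
    have e1 : 2 * (i : Int) + 1 = ((2 * i + 1 : Nat) : Int) := by push_cast; ring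
    have e2 : 2 * (i : Int) + 1 + 1 = ((2 * i + 2 : Nat) : Int) := by push_cast; ring
    by_cases hv : heap.getD i 0 ≤ value
    · by_cases hf : f < k
      · simp only [if_pos (And.intro hv hf), if_pos hv]
        by_cases hl : 2 * i + 1 < heap.length
        · have hl' : 2 * (i : Int) + 1 < (heap.length : Int) := by omega
          rw [if_pos hl', if_pos hl, e1, ih (2 * i + 1) (f + (0 + 1)) hl (by omega)]
          have e2' : ((2 * i + 1 : Nat) : Int) + 1 = ((2 * i + 2 : Nat) : Int) := by
            push_cast; ring
          by_cases hr : 2 * i + 2 < heap.length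
          · have hr' : ((2 * i + 1 : Nat) : Int) + 1 < (heap.length : Int) := by push_cast; omega
            rw [if_pos hr', if_pos hr, e2',
              ih (2 * i + 2) _ hr (by omega)]
            have s1 : (0 : Int) ≤ (sizeS heap value (2 * i + 1) : Int) := Int.natCast_nonneg _
            have s2 : (0 : Int) ≤ (sizeS heap value (2 * i + 2) : Int) := Int.natCast_nonneg _
            push_cast
            omega
          · have hr' : ¬ (((2 * i + 1 : Nat) : Int) + 1 < (heap.length : Int)) := by push_cast; omega
            rw [if_neg hr', if_neg hr]
            have s1 : (0 : Int) ≤ (sizeS heap value (2 * i + 1) : Int) := Int.natCast_nonneg _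
            push_cast
            omega
        · have hl' : ¬ (2 * (i : Int) + 1 < (heap.length : Int)) := by omega
          have hr : ¬ (2 * i + 2 < heap.length) := by omega
          have hr' : ¬ (2 * (i : Int) + 1 + 1 < (heap.length : Int)) := by omega
          rw [if_neg hl', if_neg hl, if_neg hr', if_neg hr]
          omega
      · rw [if_neg (by tauto), if_pos hv]
        have s1 : (0 : Int) ≤ ((1 + (if 2 * i + 1 < heap.length then sizeS heap value (2 * i + 1) else 0) + (if 2 * i + 2 < heap.length then sizeS heap value (2 * i + 2) else 0) : Nat) : Int) := Int.natCast_nonneg _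
        omega
    · rw [if_neg (by tauto), if_neg hv]
      omega

lemma loopB_eq (heap : List Int) (value : Int) (fuel : Nat) :
    ∀ (stack : List Int) (total : Int),
      (∀ i ∈ stack, 0 ≤ i ∧ i.toNat < heap.length ∧ heap.getD i.toNat 0 ≤ value) →
      (stack.map (fun i => sizeS heap value i.toNat)).sum ≤ fuel →
      loopB heap value fuel stack total
        = total + ((stack.map (fun i => sizeS heap value i.toNat)).sum : Int) := by
  induction fuel with
  | zero =>
    intro stack total hinv hf
    cases stack with
    | nil => simp [loopB]
    | cons i rest =>
      obtain ⟨h0, h1, h2⟩ := hinv i (by simp)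
      have hp := sizeS_pos heap value i.toNat h1 h2
      simp only [List.map_cons, List.sum_cons] at hf
      omega
  | succ fuel ih =>
    intro stack total hinv hf
    cases stack with
    | nil => simp [loopB]
    | cons i rest =>
      obtain ⟨h0, h1, h2⟩ := hinv i (by simp)
      have tL : (2 * i + 1).toNat = 2 * i.toNat + 1 := by omega
      have tR : (2 * i + 2).toNat = 2 * i.toNat + 2 := by omega
      have cL : (2 * i + 1 : Int) = ((2 * i.toNat + 1 : Nat) : Int) := by omega
      have cR : (2 * i + 2 : Int) = ((2 * i.toNat + 2 : Nat) : Int) := by omega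
      have bridgeL : (2 * i + 1 < (heap.length : Int) ∧ PySem.List.pyGetD heap (2 * i + 1) 0 ≤ value)
          ↔ (2 * i.toNat + 1 < heap.length ∧ heap.getD (2 * i.toNat + 1) 0 ≤ value) := by
        rw [cL, PySem.List.pyGetD_natCast]
        constructor
        · rintro ⟨a, b⟩; exact ⟨by exact_mod_cast a, b⟩
        · rintro ⟨a, b⟩; exact ⟨by exact_mod_cast a, b⟩
      have bridgeR : (2 * i + 2 < (heap.length : Int) ∧ PySem.List.pyGetD heap (2 * i + 2) 0 ≤ value)
          ↔ (2 * i.toNat + 2 < heap.length ∧ heap.getD (2 * i.toNat + 2) 0 ≤ value) := by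
        rw [cR, PySem.List.pyGetD_natCast]
        constructor
        · rintro ⟨a, b⟩; exact ⟨by exact_mod_cast a, b⟩
        · rintro ⟨a, b⟩; exact ⟨by exact_mod_cast a, b⟩
      have hsz : sizeS heap value i.toNat
          = 1 + (if 2 * i.toNat + 1 < heap.length then sizeS heap value (2 * i.toNat + 1) else 0)
              + (if 2 * i.toNat + 2 < heap.length then sizeS heap value (2 * i.toNat + 2) else 0) := by
        rw [sizeS, dif_pos h1, if_pos h2]
      have hinv' : ∀ j ∈ rest, 0 ≤ j ∧ j.toNat < heap.length ∧ heap.getD j.toNat 0 ≤ value :=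
        fun j hj => hinv j (List.mem_cons_of_mem _ hj)
      simp only [loopB, List.map_cons, List.sum_cons] at *
      by_cases hL : 2 * i.toNat + 1 < heap.length ∧ heap.getD (2 * i.toNat + 1) 0 ≤ value
      · rw [if_pos (bridgeL.mpr hL)]
        by_cases hR : 2 * i.toNat + 2 < heap.length ∧ heap.getD (2 * i.toNat + 2) 0 ≤ value
        · rw [if_pos (bridgeR.mpr hR)]
          rw [ih ((2 * i + 2) :: (2 * i + 1) :: rest) (total + 1) ?_ ?_]
          · simp only [List.map_cons, List.sum_cons, tL, tR, hsz,
              if_pos hL.1, if_pos hR.1]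
            push_cast
            ring
          · intro j hj
            rcases List.mem_cons.1 hj with h | hj
            · subst h; exact ⟨by omega, by rw [tR]; exact hR.1, by rw [tR]; exact hR.2⟩
            rcases List.mem_cons.1 hj with h | hj
            · subst h; exact ⟨by omega, by rw [tL]; exact hL.1, by rw [tL]; exact hL.2⟩
            · exact hinv' j hj
          · simp only [List.map_cons, List.sum_cons, tL, tR]
            rw [hsz, if_pos hL.1, if_pos hR.1] at hf
            omega
        · rw [if_neg (fun h => hR (bridgeR.mp h))]
          have zR : (if 2 * i.toNat + 2 < heap.length then sizeS heap value (2 * i.toNat + 2) else 0) = 0 := by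
            split_ifs with h
            · exact sizeS_eq_zero_of_gt heap value _ (fun hle => hR ⟨h, hle⟩)
            · rfl
          rw [ih ((2 * i + 1) :: rest) (total + 1) ?_ ?_]
          · simp only [List.map_cons, List.sum_cons, tL, hsz, if_pos hL.1, zR]
            push_cast
            ring
          · intro j hj
            rcases List.mem_cons.1 hj with h | hj
            · subst h; exact ⟨by omega, by rw [tL]; exact hL.1, by rw [tL]; exact hL.2⟩
            · exact hinv' j hj
          · simp only [List.map_cons, List.sum_cons, tL]
            rw [hsz, if_pos hL.1, zR] at hf
            omega
      · rw [if_neg (fun h => hL (bridgeL.mp h))]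
        have zL : (if 2 * i.toNat + 1 < heap.length then sizeS heap value (2 * i.toNat + 1) else 0) = 0 := by
          split_ifs with h
          · exact sizeS_eq_zero_of_gt heap value _ (fun hle => hL ⟨h, hle⟩)
          · rfl
        by_cases hR : 2 * i.toNat + 2 < heap.length ∧ heap.getD (2 * i.toNat + 2) 0 ≤ value
        · rw [if_pos (bridgeR.mpr hR)]
          rw [ih ((2 * i + 2) :: rest) (total + 1) ?_ ?_]
          · simp only [List.map_cons, List.sum_cons, tR, hsz, if_pos hR.1, zL]
            push_cast
            ring
          · intro j hj
            rcases List.mem_cons.1 hj with h | hj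
            · subst h; exact ⟨by omega, by rw [tR]; exact hR.1, by rw [tR]; exact hR.2⟩
            · exact hinv' j hj
          · simp only [List.map_cons, List.sum_cons, tR]
            rw [hsz, if_pos hR.1, zL] at hf
            omega
        · rw [if_neg (fun h => hR (bridgeR.mp h))]
          have zR : (if 2 * i.toNat + 2 < heap.length then sizeS heap value (2 * i.toNat + 2) else 0) = 0 := by
            split_ifs with h
            · exact sizeS_eq_zero_of_gt heap value _ (fun hle => hR ⟨h, hle⟩)
            · rfl
          rw [ih rest (total + 1) hinv' ?_]
          · rw [hsz, zL, zR]
            push_cast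
            ring
          · rw [hsz, zL, zR] at hf
            omega

-- ===== VERDICT (by name: the statement is the Claim_ definition above) =====
theorem find_recur_in_heap_spec : Claim_equal_find_recur_in_heap := by
  intro heap value index k found _hdom hpre
  obtain ⟨h0, h1⟩ := hpre
  unfold Spec_find_recur_in_heap find_recur_in_heap find_recur_in_heap_alt
  have hi : index.toNat < heap.length := by omega
  have ei : ((index.toNat : Nat) : Int) = index := Int.toNat_of_nonneg h0
  rw [← ei,
    findRecA_eq heap value k (heap.length + 1) index.toNat found hi (by omega),
    PySem.List.pyGetD_natCast]
  by_cases hv : value < heap.getD index.toNat 0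
  · rw [if_pos hv, sizeS_eq_zero_of_gt heap value index.toNat (by omega)]
    simp only [Nat.cast_zero]
    omega
  · rw [if_neg hv]
    rw [loopB_eq heap value (2 ^ heap.length) [((index.toNat : Nat) : Int)] 0 ?_ ?_]
    · simp only [List.map_cons, List.map_nil, List.sum_cons, List.sum_nil,
        Int.toNat_natCast, Nat.add_zero]
      ring_nf
    · intro j hj
      rw [List.mem_singleton] at hj
      subst hj
      refine ⟨by omega, ?_, ?_⟩ <;> rw [Int.toNat_natCast]
      · exact hi
      · omega
    · simp only [List.map_cons, List.map_nil, List.sum_cons, List.sum_nil,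
        Int.toNat_natCast, Nat.add_zero]
      have b1 := sizeS_le heap value index.toNat
      have b2 : 2 ^ (heap.length - index.toNat) ≤ 2 ^ heap.length :=
        Nat.pow_le_pow_right (by norm_num) (by omega)
      exact le_trans b1 (le_trans (Nat.sub_le _ _) b2)
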